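-- pv_equiv track=rewrite | github.com/mtran14/BERT-pytorch-lm | bert/preprocess/create_finetune_dataset.py | mosi_filename_convert
-- ===== SOURCE A (Python) =====
-- def mosi_filename_convert(input_string):
--     # convert input string such that last 4 index are digits
--     cnt = 0
--     output_str = ''
--     for i in reversed(range(len(input_string))):
--         if(input_string[i].isdigit()):
--             cnt += 1
--             output_str += input_string[i]
--         else:
--             if(cnt < 4):
--                 output_str += '0'*(4-cnt)
--                 cnt = 4
--             output_str += input_string[i]
--     return output_str[::-1]
-- ===== SOURCE B (Python) =====
-- def mosi_filename_convert(input_string):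
--     # find start index of the maximal trailing run of digits
--     i = len(input_string)
--     while i > 0 and input_string[i - 1].isdigit():
--         i -= 1
--     if i == 0:
--         # empty string or entirely digits: unchanged
--         return input_string
--     ndigits = len(input_string) - i
--     if ndigits < 4:
--         return input_string[:i] + '0' * (4 - ndigits) + input_string[i:]
--     return input_string
-- ===== Notes on version B (the rewrite author's own statement) =====
-- stated objective: simpler
-- what changed: Replaces the reversed char-by-char accumulation (counter + string building + final reversal) with a backward boundary search for the trailing digit run followed by a single slice concatenation.
import Mathlib
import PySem

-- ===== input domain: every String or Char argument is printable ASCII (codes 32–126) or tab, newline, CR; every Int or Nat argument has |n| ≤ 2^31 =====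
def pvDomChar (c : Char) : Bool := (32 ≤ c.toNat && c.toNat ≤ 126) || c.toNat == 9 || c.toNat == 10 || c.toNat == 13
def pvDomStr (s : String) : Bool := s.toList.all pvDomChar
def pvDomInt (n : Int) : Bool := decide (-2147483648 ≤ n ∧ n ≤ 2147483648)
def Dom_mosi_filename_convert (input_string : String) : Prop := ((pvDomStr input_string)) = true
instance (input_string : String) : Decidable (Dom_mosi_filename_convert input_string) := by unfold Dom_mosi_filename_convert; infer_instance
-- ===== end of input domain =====

-- B pads the trailing digit run of the filename to 4 digits by a backward boundary search plus
-- one slice concatenation, instead of A's reversed char-by-char accumulation; objective: simpler.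

-- ===== PORT A =====
-- one loop step of A: state = (cnt, output_str as List Char), c = input_string[i]
def pvAStep (state : Nat × List Char) (c : Char) : Nat × List Char :=
  if PySem.Chars.isdigit c then (state.1 + 1, state.2 ++ [c])
  else
    let s2 : Nat × List Char :=
      if state.1 < 4 then (4, state.2 ++ List.replicate (4 - state.1) '0') else state
    (s2.1, s2.2 ++ [c])

def mosi_filename_convert (input_string : String) : String :=
  -- for i in reversed(range(len(input_string))): visits the characters of input_string in reverse
  String.ofList ((input_string.toList.reverse.foldl pvAStep (0, [])).2.reverse)

-- ===== PORT B =====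
-- while i > 0 and input_string[i-1].isdigit(): i -= 1   (structural recursion on i)
def pvBoundary (cs : List Char) : Nat → Nat
  | 0 => 0
  | i + 1 => if PySem.Chars.isdigit (cs.getD i ' ') then pvBoundary cs i else i + 1

def mosi_filename_convert_alt (input_string : String) : String :=
  let cs := input_string.toList
  let i := pvBoundary cs cs.length
  if i = 0 then input_string
  else
    let ndigits := cs.length - i
    if ndigits < 4 then
      String.ofList (cs.take i ++ List.replicate (4 - ndigits) '0' ++ cs.drop i)
    else input_string

-- ===== PRECONDITION & SPEC =====
def Spec_mosi_filename_convert (input_string : String) (out : String) : Prop := out = mosi_filename_convert_alt input_string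
instance (input_string : String) (out : String) : Decidable (Spec_mosi_filename_convert input_string out) := by unfold Spec_mosi_filename_convert; infer_instance

-- ===== CLAIM (what is proved, stated in full; the proofs are below) =====
def Claim_equal_mosi_filename_convert : Prop := ∀ (input_string : String), Dom_mosi_filename_convert input_string → Spec_mosi_filename_convert input_string (mosi_filename_convert input_string)

-- ===== LEMMAS AND PROOFS =====

-- A's loop over a block of digits: appends them and counts them
theorem pvA_digits (ds : List Char) (h : ∀ c ∈ ds, PySem.Chars.isdigit c = true) :
    ∀ (cnt : Nat) (out : List Char),
      ds.foldl pvAStep (cnt, out) = (cnt + ds.length, out ++ ds) := by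
  induction ds with
  | nil => intro cnt out; simp
  | cons c t ih =>
      intro cnt out
      have hc : PySem.Chars.isdigit c = true := h c (List.mem_cons_self ..)
      simp only [List.foldl_cons, pvAStep, hc, if_true]
      rw [ih (fun x hx => h x (List.mem_cons_of_mem _ hx))]
      simp [List.append_assoc]
      omega

-- once cnt ≥ 4, A's loop just appends every remaining character
theorem pvA_tail (l : List Char) : ∀ (cnt : Nat) (out : List Char), 4 ≤ cnt →
    (l.foldl pvAStep (cnt, out)).2 = out ++ l := by
  induction l with
  | nil => intro cnt out _; simp
  | cons c t ih =>
      intro cnt out hcnt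
      by_cases hc : PySem.Chars.isdigit c = true
      · simp only [List.foldl_cons, pvAStep, hc, if_true]
        rw [ih (cnt + 1) _ (by omega)]
        simp
      · have h4 : ¬ cnt < 4 := by omega
        have hstep : pvAStep (cnt, out) c = (cnt, out ++ [c]) := by
          simp [pvAStep, hc, h4]
        simp only [List.foldl_cons, hstep]
        rw [ih cnt _ hcnt]
        simp

-- B's boundary loop = length minus the maximal trailing digit run
theorem pvBoundary_eq (cs : List Char) : ∀ (i : Nat), i ≤ cs.length →
    pvBoundary cs i = i - ((cs.take i).reverse.takeWhile PySem.Chars.isdigit).length := by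
  intro i
  induction i with
  | zero => intro _; simp [pvBoundary]
  | succ i ih =>
      intro hle
      have hi : i < cs.length := by omega
      have htake : (cs.take (i + 1)).reverse = cs.getD i ' ' :: (cs.take i).reverse := by
        rw [List.getD_eq_getElem cs ' ' hi, List.take_succ_eq_append_getElem hi]
        simp
      have hlen' : ((cs.take i).reverse.takeWhile PySem.Chars.isdigit).length ≤ i := by
        have h1 := (List.takeWhile_sublist (p := PySem.Chars.isdigit)
          (l := (cs.take i).reverse)).length_le
        simp only [List.length_reverse, List.length_take] at h1
        omega
      by_cases hc : PySem.Chars.isdigit (cs.getD i ' ') = true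
      · rw [show pvBoundary cs (i + 1) = pvBoundary cs i by
              simp only [pvBoundary]; rw [if_pos hc],
            ih (by omega), htake, List.takeWhile_cons_of_pos hc]
        simp only [List.length_cons]
        omega
      · rw [show pvBoundary cs (i + 1) = i + 1 by
              simp only [pvBoundary]; rw [if_neg hc],
            htake, List.takeWhile_cons_of_neg (by simpa using hc)]
        simp

-- ===== VERDICT (by name: the statement is the Claim_ definition above) =====
theorem mosi_filename_convert_spec : Claim_equal_mosi_filename_convert := by
  intro s _
  unfold Spec_mosi_filename_convert mosi_filename_convert mosi_filename_convert_alt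
  set cs := s.toList with hcs
  set r := cs.reverse with hr
  set d := r.takeWhile PySem.Chars.isdigit with hd
  set p := r.dropWhile PySem.Chars.isdigit with hp
  have hsplit : r = d ++ p := (List.takeWhile_append_dropWhile).symm
  have hdl : d.length ≤ cs.length := by
    have := (List.takeWhile_sublist (p := PySem.Chars.isdigit) (l := r)).length_le
    simpa [hr] using this
  have hb : pvBoundary cs cs.length = cs.length - d.length := by
    have := pvBoundary_eq cs cs.length le_rfl
    simpa [List.take_length, hr, hd] using this
  have hfold1 : d.foldl pvAStep (0, []) = (d.length, d) := by
    rw [pvA_digits d (fun c hc => List.mem_takeWhile_imp hc) 0 []]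
    simp
  have hpl : p.length = cs.length - d.length := by
    have h1 := congrArg List.length hsplit
    have h2 : r.length = cs.length := by simp [hr]
    simp only [List.length_append] at h1
    omega
  have hcsrev : cs = p.reverse ++ d.reverse := by
    have h1 := congrArg List.reverse hsplit
    simpa [hr] using h1
  have hptake : p.reverse = cs.take (cs.length - d.length) := by
    rw [hcsrev]; simp [hpl]
  have hddrop : d.reverse = cs.drop (cs.length - d.length) := by
    rw [hcsrev]; simp [hpl]
  cases hpc : p with
  | nil =>
      have hdn : d.length = cs.length := by rw [hpc] at hpl; simp at hpl; omega
      have hb0 : pvBoundary cs cs.length = 0 := by rw [hb]; omega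
      have hrd : r = d := by rw [hsplit, hpc, List.append_nil]
      rw [hrd, hfold1]
      simp only [hb0]
      have hdrev : d.reverse = cs := by rw [hddrop]; simp [hdn]
      rw [hdrev, hcs]
      simp
  | cons c t =>
      have hcnd : PySem.Chars.isdigit c = false := by
        have h1 := List.head?_dropWhile_not PySem.Chars.isdigit r
        rw [← hp, hpc] at h1
        simpa using h1
      have hi0 : cs.length - d.length ≠ 0 := by
        rw [hpc] at hpl; simp at hpl; omega
      rw [hsplit, hpc, List.foldl_append, hfold1, List.foldl_cons]
      simp only [hb]
      rw [if_neg hi0]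
      have hnd : cs.length - (cs.length - d.length) = d.length := by omega
      by_cases hk : d.length < 4
      · have hstep : pvAStep (d.length, d) c
            = (4, (d ++ List.replicate (4 - d.length) '0') ++ [c]) := by
          simp [pvAStep, hcnd, hk]
        rw [hstep, pvA_tail t 4 _ le_rfl]
        rw [hnd, if_pos hk]
        congr 1
        rw [← hptake, ← hddrop, hpc]
        simp [List.reverse_append, List.reverse_replicate, List.append_assoc]
      · have hstep : pvAStep (d.length, d) c = (d.length, d ++ [c]) := by
          simp [pvAStep, hcnd, hk]
        rw [hstep, pvA_tail t d.length _ (by omega)]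
        rw [hnd, if_neg hk]
        have : ((d ++ [c]) ++ t).reverse = cs := by
          calc ((d ++ [c]) ++ t).reverse = (t.reverse ++ [c]) ++ d.reverse := by
                simp [List.reverse_append]
            _ = (c :: t).reverse ++ d.reverse := by simp
            _ = p.reverse ++ d.reverse := by rw [hpc]
            _ = cs := hcsrev.symm
        rw [this, hcs]
        simp
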